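-- pv_equiv track=rewrite | github.com/yishaiam518/StockTradeSolution | src/backtesting/ai_backtesting_engine.py | _has_conflicting_strategies
-- ===== SOURCE A (Python) =====
-- from typing import Dict, List, Tuple, Optional, Any
--
-- def _has_conflicting_strategies(combo: List[str]) -> bool:
--     """Check if strategy combination has conflicts."""
--     # Multiple trend indicators might conflict
--     trend_indicators = ['macd', 'moving_average', 'momentum']
--     trend_count = sum(1 for s in combo if s in trend_indicators)
--
--     # Multiple volatility indicators might conflict
--     volatility_indicators = ['bollinger_bands', 'rsi']
--     volatility_count = sum(1 for s in combo if s in volatility_indicators)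
--
--     # Too many trend indicators
--     if trend_count > 2:
--         return True
--
--     # Too many volatility indicators
--     if volatility_count > 2:
--         return True
--
--     return False
-- ===== SOURCE B (Python) =====
-- def _has_conflicting_strategies(combo):
--     """Check if strategy combination has conflicts."""
--     # Single early-exit pass: classify each symbol via a category map and
--     # stop as soon as any category's running count exceeds 2.
--     CATEGORY = {'macd': 0, 'moving_average': 0, 'momentum': 0,
--                 'bollinger_bands': 1, 'rsi': 1}
--     counts = [0, 0]
--     for s in combo:
--         c = CATEGORY.get(s)
--         if c is not None:
--             counts[c] += 1
--             if counts[c] > 2: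
--                 return True
--     return False
-- ===== Notes on version B (the rewrite author's own statement) =====
-- stated objective: alternative
-- what changed: B makes a single early-exit pass over combo, classifying each element through a category map and returning True the moment either category's running count exceeds 2, instead of A's two full membership-test scans followed by threshold checks.
import Mathlib
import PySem

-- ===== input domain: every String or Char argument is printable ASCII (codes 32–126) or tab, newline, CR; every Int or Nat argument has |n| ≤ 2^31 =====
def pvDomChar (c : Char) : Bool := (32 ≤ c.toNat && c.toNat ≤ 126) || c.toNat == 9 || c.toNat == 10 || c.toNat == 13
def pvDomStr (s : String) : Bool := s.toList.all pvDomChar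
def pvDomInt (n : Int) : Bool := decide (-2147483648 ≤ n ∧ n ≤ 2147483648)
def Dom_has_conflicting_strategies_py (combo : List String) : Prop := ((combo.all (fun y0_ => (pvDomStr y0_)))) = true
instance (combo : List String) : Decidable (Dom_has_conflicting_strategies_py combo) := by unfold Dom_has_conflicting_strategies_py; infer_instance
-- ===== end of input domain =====

-- ===== PORT A =====
-- B replaces A's two full membership-scan passes by one early-exit pass over combo through a category map (alternative decomposition; same O(n) cost).
def has_conflicting_strategies_py (combo : List String) : Bool :=
  let trend_indicators := ["macd", "moving_average", "momentum"]
  let trend_count : Int :=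
    combo.foldl (fun acc s => acc + (if s ∈ trend_indicators then 1 else 0)) 0
  let volatility_indicators := ["bollinger_bands", "rsi"]
  let volatility_count : Int :=
    combo.foldl (fun acc s => acc + (if s ∈ volatility_indicators then 1 else 0)) 0
  if trend_count > 2 then true
  else if volatility_count > 2 then true
  else false

-- ===== PORT B =====
-- Python B's CATEGORY dict literal.
def hcsCategory : PySem.Dict String Int :=
  PySem.Dict.ofList [("macd", 0), ("moving_average", 0), ("momentum", 0),
                     ("bollinger_bands", 1), ("rsi", 1)]

-- The for-loop with its early 'return True': counts[0] = t, counts[1] = v.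
def hcsGo : List String → Int → Int → Bool
  | [], _, _ => false
  | s :: rest, t, v =>
    match hcsCategory.get? s with
    | none => hcsGo rest t v
    | some c =>
      if c = 0 then
        if t + 1 > 2 then true else hcsGo rest (t + 1) v
      else
        if v + 1 > 2 then true else hcsGo rest t (v + 1)

def has_conflicting_strategies_py_alt (combo : List String) : Bool :=
  hcsGo combo 0 0

-- ===== PRECONDITION & SPEC =====
def Spec_has_conflicting_strategies_py (combo : List String) (out : Bool) : Prop := out = has_conflicting_strategies_py_alt combo
instance (combo : List String) (out : Bool) : Decidable (Spec_has_conflicting_strategies_py combo out) := by unfold Spec_has_conflicting_strategies_py; infer_instance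

-- ===== CLAIM (what is proved, stated in full; the proofs are below) =====
def Claim_equal_has_conflicting_strategies_py : Prop := ∀ (combo : List String), Dom_has_conflicting_strategies_py combo → Spec_has_conflicting_strategies_py combo (has_conflicting_strategies_py combo)

-- ===== LEMMAS AND PROOFS =====

-- Evaluating the literal CATEGORY dict lookup.
lemma hcsCategory_get? (s : String) :
    hcsCategory.get? s =
      if "macd" = s then some 0 else if "moving_average" = s then some 0
      else if "momentum" = s then some 0 else if "bollinger_bands" = s then some 1
      else if "rsi" = s then some 1 else none := by
  have h : hcsCategory = PySem.Dict.mk [("macd", 0), ("moving_average", 0), ("momentum", 0),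
      ("bollinger_bands", 1), ("rsi", 1)] := by decide
  rw [h]
  simp only [PySem.Dict.get?_mk_cons, beq_iff_eq]
  simp [PySem.Dict.get?]

def hcsT (combo : List String) : Int :=
  (combo.count "macd" : Int) + combo.count "moving_average" + combo.count "momentum"

def hcsV (combo : List String) : Int :=
  (combo.count "bollinger_bands" : Int) + combo.count "rsi"

lemma hcsT_nonneg (combo : List String) : 0 ≤ hcsT combo := by
  unfold hcsT; positivity

lemma hcsV_nonneg (combo : List String) : 0 ≤ hcsV combo := by
  unfold hcsV; positivity

-- One step of the loop: each element is a trend name (category 0), a volatility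
-- name (category 1), or unclassified, and the counts move accordingly.
lemma hcs_step (x : String) (xs : List String) :
    (hcsCategory.get? x = some 0 ∧ hcsT (x :: xs) = hcsT xs + 1 ∧ hcsV (x :: xs) = hcsV xs)
    ∨ (hcsCategory.get? x = some 1 ∧ hcsT (x :: xs) = hcsT xs ∧ hcsV (x :: xs) = hcsV xs + 1)
    ∨ (hcsCategory.get? x = none ∧ hcsT (x :: xs) = hcsT xs ∧ hcsV (x :: xs) = hcsV xs) := by
  rw [hcsCategory_get?]
  unfold hcsT hcsV
  split_ifs with h1 h2 h3 h4 h5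
  · refine Or.inl ⟨rfl, ?_, ?_⟩ <;> subst h1 <;>
      simp [List.count_cons] <;> push_cast <;> ring
  · refine Or.inl ⟨rfl, ?_, ?_⟩ <;> subst h2 <;>
      simp [List.count_cons] <;> push_cast <;> ring
  · refine Or.inl ⟨rfl, ?_, ?_⟩ <;> subst h3 <;>
      simp [List.count_cons] <;> push_cast <;> ring
  · refine Or.inr (Or.inl ⟨rfl, ?_, ?_⟩) <;> subst h4 <;>
      simp [List.count_cons] <;> push_cast <;> ring
  · refine Or.inr (Or.inl ⟨rfl, ?_, ?_⟩) <;> subst h5 <;>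
      simp [List.count_cons] <;> push_cast <;> ring
  · refine Or.inr (Or.inr ⟨rfl, ?_, ?_⟩) <;>
      simp [List.count_cons, beq_iff_eq, h1, h2, h3, h4, h5, Ne.symm]
  
-- Loop invariant: for in-bounds running counts, the early-exit loop decides the threshold test.
lemma hcsGo_eq (combo : List String) : ∀ t v : Int, t ≤ 2 → v ≤ 2 →
    hcsGo combo t v = decide (2 < t + hcsT combo ∨ 2 < v + hcsV combo) := by
  induction combo with
  | nil =>
    intro t v ht hv
    simp only [hcsGo, hcsT, hcsV, List.count_nil]
    symm; rw [decide_eq_false_iff_not]; push_neg; omega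
  | cons x xs ih =>
    intro t v ht hv
    have hT := hcsT_nonneg xs
    have hV := hcsV_nonneg xs
    rcases hcs_step x xs with ⟨hg, hT', hV'⟩ | ⟨hg, hT', hV'⟩ | ⟨hg, hT', hV'⟩ <;>
      simp only [hcsGo, hg, hT', hV']
    · rw [if_pos trivial]
      split_ifs with h
      · symm; rw [decide_eq_true_iff]; left; omega
      · rw [ih (t + 1) v (by omega) hv, decide_eq_decide]; omega
    · rw [if_neg (by simp)]
      split_ifs with h
      · symm; rw [decide_eq_true_iff]; right; omega
      · rw [ih t (v + 1) ht (by omega), decide_eq_decide]; omega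
    · exact ih t v ht hv

-- A's membership-scan folds equal the sums of per-name counts.
lemma trend_fold_eq (combo : List String) : ∀ acc : Int,
    combo.foldl (fun a s => a + (if s ∈ ["macd", "moving_average", "momentum"] then 1 else 0)) acc
      = acc + hcsT combo := by
  induction combo with
  | nil => intro acc; simp [hcsT]
  | cons x xs ih =>
    intro acc
    simp only [List.foldl_cons, ih, hcsT, List.count_cons]
    by_cases h1 : x = "macd" <;> by_cases h2 : x = "moving_average" <;>
      by_cases h3 : x = "momentum" <;>
      simp [h1, h2, h3, beq_iff_eq] <;> ring

lemma vol_fold_eq (combo : List String) : ∀ acc : Int,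
    combo.foldl (fun a s => a + (if s ∈ ["bollinger_bands", "rsi"] then 1 else 0)) acc
      = acc + hcsV combo := by
  induction combo with
  | nil => intro acc; simp [hcsV]
  | cons x xs ih =>
    intro acc
    simp only [List.foldl_cons, ih, hcsV, List.count_cons]
    by_cases h1 : x = "bollinger_bands" <;> by_cases h2 : x = "rsi" <;>
      simp [h1, h2, beq_iff_eq] <;> ring

-- ===== VERDICT (by name: the statement is the Claim_ definition above) =====
theorem has_conflicting_strategies_py_spec : Claim_equal_has_conflicting_strategies_py := by
  intro combo _
  unfold Spec_has_conflicting_strategies_py has_conflicting_strategies_py has_conflicting_strategies_py_alt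
  rw [hcsGo_eq combo 0 0 (by norm_num) (by norm_num)]
  simp only [trend_fold_eq, vol_fold_eq, zero_add]
  split_ifs with h1 h2 <;> symm <;>
    first
    | (rw [decide_eq_true_iff]; omega)
    | (rw [decide_eq_false_iff_not]; push_neg; omega)
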